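-- pv_equiv track=rewrite | github.com/sangzzz/BioinformaticsGenomeAssemblyCapstone | Week3 - Genome Assembly of Real Sequencing Data/02 - Optimal Kmer size/optimalKmer.py | checkOptimal
-- ===== SOURCE A (Python) =====
-- def checkOptimal(n, reads):
--     kmers = set()
--     for read in reads:
--         for i in range(0, len(read) - n + 1):
--             kmers.add(read[i: i + n])
--     prefixes = set()
--     suffixes = set()
--     for kmer in kmers:
--         prefixes.add(kmer[:-1])
--         suffixes.add(kmer[1:])
--     return prefixes == suffixes
-- ===== SOURCE B (Python) =====
-- def checkOptimal(n, reads):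
--     # Flag table instead of two sets: map each (n-1)-mer to a pair of flags
--     # (seen as a prefix, seen as a suffix); prefixes == suffixes as sets iff
--     # every recorded (n-1)-mer carries both flags.
--     flags = {}
--     for read in reads:
--         for i in range(len(read) - n + 1):
--             w = read[i:i + n]
--             p, s = w[:-1], w[1:]
--             flags[p] = (True, flags.get(p, (False, False))[1])
--             flags[s] = (flags.get(s, (False, False))[0], True)
--     return all(v == (True, True) for v in flags.values())
-- ===== Notes on version B (the rewrite author's own statement) =====
-- stated objective: alternative
-- what changed: B replaces A's intermediate kmers set, two separate prefix/suffix sets and final set-equality comparison by a single flag table: a dict mapping each (n-1)-mer to a (seen-as-prefix, seen-as-suffix) boolean pair filled in one pass, answering with all(v == (True, True)), using that the two sets are equal iff every recorded (n-1)-mer carries both flags.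
import Mathlib
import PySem

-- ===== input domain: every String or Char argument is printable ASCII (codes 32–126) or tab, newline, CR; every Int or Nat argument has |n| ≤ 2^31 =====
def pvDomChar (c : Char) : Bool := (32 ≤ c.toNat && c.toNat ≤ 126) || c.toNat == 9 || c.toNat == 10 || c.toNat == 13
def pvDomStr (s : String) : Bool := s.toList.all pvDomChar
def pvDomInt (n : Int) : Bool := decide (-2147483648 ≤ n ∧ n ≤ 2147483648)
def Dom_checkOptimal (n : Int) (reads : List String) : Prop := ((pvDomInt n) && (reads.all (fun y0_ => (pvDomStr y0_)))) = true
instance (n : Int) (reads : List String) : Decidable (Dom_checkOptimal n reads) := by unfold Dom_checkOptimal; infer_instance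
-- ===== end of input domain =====

-- B replaces A's two sets and set comparison by a single flag table ((n-1)-mer -> seen-as-prefix/seen-as-suffix)
-- checked with all(); objective: alternative data structure, same return value.

-- ===== PORT A =====
-- literal port of Source A: build the kmers set, then one loop over it filling prefixes and suffixes
def checkOptimal (n : Int) (reads : List String) : Bool :=
  let kmers : PySem.Set String :=
    reads.foldl (fun kmers read =>
      (PySem.List.pyRange 0 (PySem.Str.len read - n + 1) 1).foldl
        (fun kmers i => PySem.Set.add kmers (PySem.Str.slice read (some i) (some (i + n)))) kmers)
      PySem.Set.empty
  let ps : PySem.Set String × PySem.Set String :=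
    kmers.foldl (fun st kmer =>
      (PySem.Set.add st.1 (PySem.Str.slice kmer none (some (-1))),
       PySem.Set.add st.2 (PySem.Str.slice kmer (some 1) none)))
      (PySem.Set.empty, PySem.Set.empty)
  PySem.Set.equal ps.1 ps.2

-- ===== PORT B =====
-- literal port of Source B: one dict mapping each (n-1)-mer to (seen-as-prefix, seen-as-suffix) flags,
-- then all(v == (True, True) for v in flags.values())
def checkOptimal_alt (n : Int) (reads : List String) : Bool :=
  let flags : PySem.Dict String (Bool × Bool) :=
    reads.foldl (fun d read =>
      (PySem.List.pyRange 0 (PySem.Str.len read - n + 1) 1).foldl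
        (fun d i =>
          let w := PySem.Str.slice read (some i) (some (i + n))
          let p := PySem.Str.slice w none (some (-1))
          let s := PySem.Str.slice w (some 1) none
          let d := d.insert p (true, (d.getD p (false, false)).2)
          d.insert s ((d.getD s (false, false)).1, true))
        d)
      PySem.Dict.empty
  flags.values.all (fun v => v == (true, true))

-- ===== PRECONDITION & SPEC =====
def Spec_checkOptimal (n : Int) (reads : List String) (out : Bool) : Prop := out = checkOptimal_alt n reads
instance (n : Int) (reads : List String) (out : Bool) : Decidable (Spec_checkOptimal n reads out) := by unfold Spec_checkOptimal; infer_instance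

-- ===== CLAIM (what is proved, stated in full; the proofs are below) =====
def Claim_equal_checkOptimal : Prop := ∀ (n : Int) (reads : List String), Dom_checkOptimal n reads → Spec_checkOptimal n reads (checkOptimal n reads)

-- ===== LEMMAS AND PROOFS =====

-- the (n-1)-prefix and (n-1)-suffix of window i of read r
def pvPre (n : Int) (r : String) (i : Int) : String :=
  PySem.Str.slice (PySem.Str.slice r (some i) (some (i + n))) none (some (-1))
def pvSuf (n : Int) (r : String) (i : Int) : String :=
  PySem.Str.slice (PySem.Str.slice r (some i) (some (i + n))) (some 1) none

-- all (prefix, suffix) pairs over all windows of all reads, flattened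
def pvPairs (n : Int) (reads : List String) : List (String × String) :=
  reads.flatMap (fun r =>
    (PySem.List.pyRange 0 (PySem.Str.len r - n + 1) 1).map (fun i => (pvPre n r i, pvSuf n r i)))

-- one step of B's loop, abstracted over the (prefix, suffix) pair
def pvStep (d : PySem.Dict String (Bool × Bool)) (ps : String × String) : PySem.Dict String (Bool × Bool) :=
  let d1 := d.insert ps.1 (true, (d.getD ps.1 (false, false)).2)
  d1.insert ps.2 ((d1.getD ps.2 (false, false)).1, true)

theorem pvStep_getD (d : PySem.Dict String (Bool × Bool)) (ps : String × String) (x : String) :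
    (pvStep d ps).getD x (false, false) =
      ((d.getD x (false, false)).1 || (ps.1 == x), (d.getD x (false, false)).2 || (ps.2 == x)) := by
  rcases ps with ⟨p, s⟩
  unfold pvStep
  simp only [PySem.Dict.getD_insert]
  by_cases h2 : x = s <;> by_cases h1 : x = p
  · subst h2; subst h1; simp
  · subst h2
    simp [h1, Ne.symm h1]
  · subst h1
    simp [h2, Ne.symm h2]
  · have hp : (p == x) = false := by simp [Ne.symm h1]
    have hs : (s == x) = false := by simp [Ne.symm h2]
    simp [h1, h2, hp, hs]

theorem pvFoldl_getD (L : List (String × String)) (d : PySem.Dict String (Bool × Bool)) (x : String) :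
    (L.foldl pvStep d).getD x (false, false) =
      ((d.getD x (false, false)).1 || L.any (fun ps => ps.1 == x),
       (d.getD x (false, false)).2 || L.any (fun ps => ps.2 == x)) := by
  induction L generalizing d with
  | nil => simp
  | cons ps L ih =>
    rw [List.foldl_cons, ih, pvStep_getD]
    simp [Bool.or_assoc]

theorem pvFoldl_keys (L : List (String × String)) (d : PySem.Dict String (Bool × Bool)) (x : String) :
    x ∈ (L.foldl pvStep d).keys ↔ x ∈ d.keys ∨ ∃ ps ∈ L, ps.1 = x ∨ ps.2 = x := by
  induction L generalizing d with
  | nil => simp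
  | cons ps L ih =>
    rw [List.foldl_cons, ih]
    unfold pvStep
    simp only [PySem.Dict.mem_keys_insert, List.mem_cons]
    aesop

theorem pvFoldl_nodup (L : List (String × String)) (d : PySem.Dict String (Bool × Bool))
    (h : d.keys.Nodup) : (L.foldl pvStep d).keys.Nodup := by
  induction L generalizing d with
  | nil => exact h
  | cons ps L ih =>
    exact ih _ (PySem.Dict.nodup_keys_insert _ _ _ (PySem.Dict.nodup_keys_insert _ _ _ h))

-- B's nested loop is the flat fold of pvStep over pvPairs
theorem pvAlt_eq_flat (n : Int) (reads : List String) :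
    checkOptimal_alt n reads =
      ((pvPairs n reads).foldl pvStep PySem.Dict.empty).values.all (fun v => v == (true, true)) := by
  unfold checkOptimal_alt pvPairs
  simp only []
  rw [List.foldl_flatMap]
  have hf : (fun (acc : PySem.Dict String (Bool × Bool)) (r : String) =>
        List.foldl pvStep acc
          ((PySem.List.pyRange 0 (PySem.Str.len r - n + 1) 1).map (fun i => (pvPre n r i, pvSuf n r i))))
      = (fun (d : PySem.Dict String (Bool × Bool)) (read : String) =>
        (PySem.List.pyRange 0 (PySem.Str.len read - n + 1) 1).foldl
          (fun d i =>
            let w := PySem.Str.slice read (some i) (some (i + n))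
            let p := PySem.Str.slice w none (some (-1))
            let s := PySem.Str.slice w (some 1) none
            let d := d.insert p (true, (d.getD p (false, false)).2)
            d.insert s ((d.getD s (false, false)).1, true))
          d) := by
    funext d r
    rw [List.foldl_map]
    rfl
  rw [hf]

-- B = true iff every recorded (n-1)-mer is both a prefix and a suffix
theorem pvAlt_iff (n : Int) (reads : List String) :
    checkOptimal_alt n reads = true ↔
      ∀ x, ((∃ ps ∈ pvPairs n reads, ps.1 = x) ∨ (∃ ps ∈ pvPairs n reads, ps.2 = x)) →
        ((∃ ps ∈ pvPairs n reads, ps.1 = x) ∧ (∃ ps ∈ pvPairs n reads, ps.2 = x)) := by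
  rw [pvAlt_eq_flat]
  have hnd := pvFoldl_nodup (pvPairs n reads) PySem.Dict.empty (by simp)
  rw [PySem.Dict.values_eq_map_keys _ hnd (false, false)]
  rw [List.all_eq_true]
  constructor
  · intro h x hx
    have hk : x ∈ ((pvPairs n reads).foldl pvStep PySem.Dict.empty).keys := by
      rw [pvFoldl_keys]
      rcases hx with ⟨ps, hps, h1⟩ | ⟨ps, hps, h1⟩
      · exact Or.inr ⟨ps, hps, Or.inl h1⟩
      · exact Or.inr ⟨ps, hps, Or.inr h1⟩
    have := h _ (List.mem_map_of_mem hk)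
    rw [pvFoldl_getD] at this
    simp only [PySem.Dict.getD_empty, Bool.false_or, beq_iff_eq, Prod.mk.injEq,
      List.any_eq_true, beq_iff_eq] at this
    exact ⟨this.1.imp (fun ps h => ⟨h.1, h.2⟩), this.2.imp (fun ps h => ⟨h.1, h.2⟩)⟩
  · intro h v hv
    rcases List.mem_map.mp hv with ⟨x, hx, rfl⟩
    rw [pvFoldl_keys] at hx
    rcases hx with hx | ⟨ps, hps, h1⟩
    · simp at hx
    · have hboth := h x (h1.imp (fun h1 => ⟨ps, hps, h1⟩) (fun h1 => ⟨ps, hps, h1⟩))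
      rw [pvFoldl_getD]
      simp only [PySem.Dict.getD_empty, Bool.false_or, beq_iff_eq, Prod.mk.injEq,
        List.any_eq_true, beq_iff_eq]
      exact ⟨hboth.1.imp (fun ps h => ⟨h.1, h.2⟩), hboth.2.imp (fun ps h => ⟨h.1, h.2⟩)⟩

-- membership in a nested "for b: for c: s.add (f b c)" loop
theorem mem_foldl_foldl_add {α β γ : Type} [BEq α] [LawfulBEq α] (l : List β) (g : β → List γ)
    (f : β → γ → α) (s : PySem.Set α) (y : α) :
    y ∈ l.foldl (fun s b => (g b).foldl (fun s c => PySem.Set.add s (f b c)) s) s ↔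
      y ∈ s ∨ ∃ b ∈ l, ∃ c ∈ g b, y = f b c := by
  induction l generalizing s with
  | nil => simp
  | cons b l ih =>
    rw [List.foldl_cons, ih, PySem.Set.mem_foldl_add]
    simp only [List.mem_cons]
    aesop

-- A = true iff the prefix and suffix occurrences coincide
theorem pvA_iff (n : Int) (reads : List String) :
    checkOptimal n reads = true ↔
      ∀ x, (∃ ps ∈ pvPairs n reads, ps.1 = x) ↔ (∃ ps ∈ pvPairs n reads, ps.2 = x) := by
  unfold checkOptimal
  simp only []
  rw [PySem.List.foldl_prod_mk
        (fun (p : PySem.Set String) (kmer : String) =>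
          PySem.Set.add p (PySem.Str.slice kmer none (some (-1))))
        (fun (s : PySem.Set String) (kmer : String) =>
          PySem.Set.add s (PySem.Str.slice kmer (some 1) none))]
  rw [PySem.Set.equal_iff]
  have hmem : ∀ (h : String → String) (x : String),
      (x ∈ (reads.foldl (fun kmers read =>
          (PySem.List.pyRange 0 (PySem.Str.len read - n + 1) 1).foldl
            (fun kmers i => PySem.Set.add kmers (PySem.Str.slice read (some i) (some (i + n)))) kmers)
          PySem.Set.empty).foldl (fun s k => PySem.Set.add s (h k)) PySem.Set.empty) ↔
      ∃ r ∈ reads, ∃ i ∈ PySem.List.pyRange 0 (PySem.Str.len r - n + 1) 1,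
        x = h (PySem.Str.slice r (some i) (some (i + n))) := by
    intro h x
    rw [PySem.Set.mem_foldl_add]
    simp only [mem_foldl_foldl_add]
    simp only [PySem.Set.empty, List.not_mem_nil, false_or]
    constructor
    · rintro ⟨k, ⟨r, hr, i, hi, rfl⟩, rfl⟩
      exact ⟨r, hr, i, hi, rfl⟩
    · rintro ⟨r, hr, i, hi, rfl⟩
      exact ⟨_, ⟨r, hr, i, hi, rfl⟩, rfl⟩
  have hpairs : ∀ x,
      ((∃ ps ∈ pvPairs n reads, ps.1 = x) ↔
        ∃ r ∈ reads, ∃ i ∈ PySem.List.pyRange 0 (PySem.Str.len r - n + 1) 1, x = pvPre n r i) ∧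
      ((∃ ps ∈ pvPairs n reads, ps.2 = x) ↔
        ∃ r ∈ reads, ∃ i ∈ PySem.List.pyRange 0 (PySem.Str.len r - n + 1) 1, x = pvSuf n r i) := by
    intro x
    constructor <;>
      (unfold pvPairs; simp only [List.mem_flatMap, List.mem_map]; aesop)
  simp only [pvPre, pvSuf] at hpairs
  constructor
  · intro h x
    rw [(hpairs x).1, (hpairs x).2]
    rw [← hmem (fun k => PySem.Str.slice k none (some (-1))) x,
        ← hmem (fun k => PySem.Str.slice k (some 1) none) x]
    exact h x
  · intro h x
    rw [hmem (fun k => PySem.Str.slice k none (some (-1))) x,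
        hmem (fun k => PySem.Str.slice k (some 1) none) x]
    rw [← (hpairs x).1, ← (hpairs x).2]
    exact h x

theorem checkOptimal_eq_alt (n : Int) (reads : List String) :
    checkOptimal n reads = checkOptimal_alt n reads := by
  rw [Bool.eq_iff_iff, pvA_iff, pvAlt_iff]
  constructor
  · intro h x _
    rcases Classical.em (∃ ps ∈ pvPairs n reads, ps.1 = x) with hp | hp
    · exact ⟨hp, (h x).mp hp⟩
    · rcases Classical.em (∃ ps ∈ pvPairs n reads, ps.2 = x) with hs | hs
      · exact ⟨(h x).mpr hs, hs⟩
      · rename_i hx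
        rcases hx with hx | hx
        · exact absurd hx hp
        · exact absurd hx hs
  · intro h x
    constructor
    · intro hp; exact (h x (Or.inl hp)).2
    · intro hs; exact (h x (Or.inr hs)).1

-- ===== VERDICT (by name: the statement is the Claim_ definition above) =====
theorem checkOptimal_spec : Claim_equal_checkOptimal := by
  intro n reads _
  unfold Spec_checkOptimal
  exact checkOptimal_eq_alt n reads
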